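-- pv_equiv track=rewrite | github.com/albertoferreirademelo/14-Finding-unique-PCR-primers-in-viral-genomes | main1_9.py | Filter_hamming_codTemp
-- ===== SOURCE A (Python) =====
-- def Filter_hamming_codTemp(all_sequence, list_of_primers, forward, annealing_temp = 15):
--     """
--     This function will compare the primers with the DNA with the help of the hamming distance
--     algorithm. If the difference of a nucleotide is A or T the temperature of annealing will
--     rise 2 degree Celsius but if the nucleotide is C or G the temperature will rise 4 degre instead.
--     If the total sum of the difference is less than the annealing temperature, then the primer will
--     be removed from the list since the annealing can bind to another place.
--     INPUT: List with all sequences of the DNA, list of primers, if the sequence is forward or reverse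
--     and the min allowed difference in the annealing temperature
--     OUTPUT: Filtered list with primers that are unique in the annealing temperature
--     """
--     filtered_hamming = list(list_of_primers)
--     for cod in all_sequence:
--         for i in list_of_primers:
--             total_sum = 0
--             compare_cod = zip(cod, i)
--             for ch1, ch2 in compare_cod:
--                 if total_sum > annealing_temp:
--                     break
--                 if ch1 != ch2:
--                     if ch2 == "A" or ch2 == "T":
--                         total_sum = total_sum+2
--                     else:
--                         total_sum = total_sum+4
--             if forward == 1:
--                 if total_sum < annealing_temp and total_sum != 0:
--                     if i in filtered_hamming: filtered_hamming.remove(i)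
--             else:
--                 if total_sum < annealing_temp:
--                     if i in filtered_hamming: filtered_hamming.remove(i)
--     return (filtered_hamming)
-- ===== SOURCE B (Python) =====
-- def Filter_hamming_codTemp(all_sequence, list_of_primers, forward, annealing_temp=15):
--     def removed(p):
--         for cod in all_sequence:
--             s = 0
--             for c1, c2 in zip(cod, p):
--                 if c1 != c2:
--                     s += 2 if c2 in "AT" else 4
--             if s < annealing_temp and (forward != 1 or s != 0):
--                 return True
--         return False
--     return [p for p in list_of_primers if not removed(p)]
-- ===== Notes on version B (the rewrite author's own statement) =====
-- stated objective: faster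
-- what changed: Replaces A's in-place copy with membership-test-and-remove bookkeeping driven by a sequences-by-primers double loop by a per-primer boolean predicate removed(p) (any sequence whose full weighted-Hamming sum triggers, short-circuiting at the first triggering sequence) and a single order-preserving filter.
import Mathlib
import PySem

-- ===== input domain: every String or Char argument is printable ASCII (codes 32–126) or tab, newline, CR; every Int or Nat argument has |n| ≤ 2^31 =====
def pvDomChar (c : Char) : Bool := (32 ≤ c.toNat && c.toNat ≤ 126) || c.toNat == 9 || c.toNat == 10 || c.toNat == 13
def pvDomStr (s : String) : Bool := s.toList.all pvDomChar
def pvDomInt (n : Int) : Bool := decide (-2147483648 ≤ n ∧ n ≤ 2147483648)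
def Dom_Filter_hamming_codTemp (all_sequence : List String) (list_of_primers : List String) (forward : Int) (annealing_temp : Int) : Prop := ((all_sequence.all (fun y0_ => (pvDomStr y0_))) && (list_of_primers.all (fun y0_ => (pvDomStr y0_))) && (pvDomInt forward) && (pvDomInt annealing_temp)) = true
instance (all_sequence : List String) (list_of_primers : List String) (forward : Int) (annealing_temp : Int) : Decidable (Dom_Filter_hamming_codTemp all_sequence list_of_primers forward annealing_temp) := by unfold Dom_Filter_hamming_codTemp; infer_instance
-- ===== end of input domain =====

-- B replaces A's mutate-and-remove bookkeeping (in-place list, membership test, list.remove)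
-- with a per-primer any-sequence predicate and a single filter pass; measured faster (no O(P) remove/membership scans per pair, early exit per primer).

-- ===== PORT A =====
-- the inner character loop of A: early break once total_sum > annealing_temp, else
-- +2 on mismatch against 'A'/'T', +4 otherwise
def pvSumA (temp : Int) : List (Char × Char) → Int → Int
  | [], s => s
  | (c1, c2) :: rest, s =>
      if temp < s then s
      else pvSumA temp rest (if c1 ≠ c2 then s + (if c2 = 'A' ∨ c2 = 'T' then 2 else 4) else s)

def Filter_hamming_codTemp (all_sequence : List String) (list_of_primers : List String) (forward : Int) (annealing_temp : Int) : List String :=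
  all_sequence.foldl (fun filtered cod =>
    list_of_primers.foldl (fun fl i =>
      let total_sum := pvSumA annealing_temp (cod.toList.zip i.toList) 0
      if forward = 1 then
        if total_sum < annealing_temp ∧ total_sum ≠ 0 then
          (if i ∈ fl then fl.erase i else fl)
        else fl
      else
        if total_sum < annealing_temp then
          (if i ∈ fl then fl.erase i else fl)
        else fl) filtered) list_of_primers

-- ===== PORT B =====
-- B's helper: plain weighted-Hamming sum over zip(cod, p), no break
def pvSumB (pairs : List (Char × Char)) : Int :=
  pairs.foldl (fun s p => if p.1 ≠ p.2 then s + (if p.2 = 'A' ∨ p.2 = 'T' then 2 else 4) else s) 0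

-- B's helper `removed`: does any sequence trigger removal of primer p?
def pvRemoved (all_sequence : List String) (forward : Int) (annealing_temp : Int) (p : String) : Bool :=
  all_sequence.any (fun cod =>
    let s := pvSumB (cod.toList.zip p.toList)
    decide (s < annealing_temp) && (decide (forward ≠ 1) || decide (s ≠ 0)))

def Filter_hamming_codTemp_alt (all_sequence : List String) (list_of_primers : List String) (forward : Int) (annealing_temp : Int) : List String :=
  list_of_primers.filter (fun p => !pvRemoved all_sequence forward annealing_temp p)

-- ===== PRECONDITION & SPEC =====
def Spec_Filter_hamming_codTemp (all_sequence : List String) (list_of_primers : List String) (forward : Int) (annealing_temp : Int) (out : List String) : Prop := out = Filter_hamming_codTemp_alt all_sequence list_of_primers forward annealing_temp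
instance (all_sequence : List String) (list_of_primers : List String) (forward : Int) (annealing_temp : Int) (out : List String) : Decidable (Spec_Filter_hamming_codTemp all_sequence list_of_primers forward annealing_temp out) := by unfold Spec_Filter_hamming_codTemp; infer_instance

-- ===== CLAIM (what is proved, stated in full; the proofs are below) =====
def Claim_equal_Filter_hamming_codTemp : Prop := ∀ (all_sequence : List String) (list_of_primers : List String) (forward : Int) (annealing_temp : Int), Dom_Filter_hamming_codTemp all_sequence list_of_primers forward annealing_temp → Spec_Filter_hamming_codTemp all_sequence list_of_primers forward annealing_temp (Filter_hamming_codTemp all_sequence list_of_primers forward annealing_temp)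

-- ===== LEMMAS AND PROOFS =====

-- the accumulator-form of B's sum
def pvSumBAcc (pairs : List (Char × Char)) (s : Int) : Int :=
  pairs.foldl (fun s p => if p.1 ≠ p.2 then s + (if p.2 = 'A' ∨ p.2 = 'T' then 2 else 4) else s) s

lemma pvSumB_eq_acc (pairs : List (Char × Char)) : pvSumB pairs = pvSumBAcc pairs 0 := rfl

lemma pvSumBAcc_ge (pairs : List (Char × Char)) (s : Int) : s ≤ pvSumBAcc pairs s := by
  induction pairs generalizing s with
  | nil => simp [pvSumBAcc]
  | cons p rest ih =>
    have h1 : pvSumBAcc (p :: rest) s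
        = pvSumBAcc rest (if p.1 ≠ p.2 then s + (if p.2 = 'A' ∨ p.2 = 'T' then 2 else 4) else s) := rfl
    rw [h1]
    have h2 := ih (if p.1 ≠ p.2 then s + (if p.2 = 'A' ∨ p.2 = 'T' then 2 else 4) else s)
    split_ifs at h2 ⊢ <;> omega

-- the broken sum either equals the full sum, or both exceed temp
lemma pvSumA_cases (temp : Int) (pairs : List (Char × Char)) (s : Int) :
    pvSumA temp pairs s = pvSumBAcc pairs s ∨
      (temp < pvSumA temp pairs s ∧ temp < pvSumBAcc pairs s) := by
  induction pairs generalizing s with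
  | nil => left; rfl
  | cons p rest ih =>
    have hA : pvSumA temp (p :: rest) s
        = if temp < s then s
          else pvSumA temp rest (if p.1 ≠ p.2 then s + (if p.2 = 'A' ∨ p.2 = 'T' then 2 else 4) else s) := rfl
    have hB : pvSumBAcc (p :: rest) s
        = pvSumBAcc rest (if p.1 ≠ p.2 then s + (if p.2 = 'A' ∨ p.2 = 'T' then 2 else 4) else s) := rfl
    rw [hA, hB]
    by_cases h : temp < s
    · rw [if_pos h]
      right
      refine ⟨h, ?_⟩
      have h3 := pvSumBAcc_ge rest (if p.1 ≠ p.2 then s + (if p.2 = 'A' ∨ p.2 = 'T' then 2 else 4) else s)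
      split_ifs at h3 ⊢ <;> omega
    · rw [if_neg h]
      exact ih _

-- the trigger condition agrees between the broken sum (A) and the full sum (B)
lemma pvTrig_lt (temp : Int) (pairs : List (Char × Char)) :
    (pvSumA temp pairs 0 < temp ∧ pvSumA temp pairs 0 ≠ 0) ↔
      (pvSumB pairs < temp ∧ pvSumB pairs ≠ 0) := by
  rcases pvSumA_cases temp pairs 0 with h | ⟨h1, h2⟩
  · rw [pvSumB_eq_acc, ← h]
  · rw [pvSumB_eq_acc]
    constructor <;> (rintro ⟨hl, _⟩; omega)

lemma pvTrig_lt' (temp : Int) (pairs : List (Char × Char)) :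
    (pvSumA temp pairs 0 < temp) ↔ (pvSumB pairs < temp) := by
  rcases pvSumA_cases temp pairs 0 with h | ⟨h1, h2⟩
  · rw [pvSumB_eq_acc, ← h]
  · rw [pvSumB_eq_acc]; omega

-- unified boolean trigger (B's form)
def pvTrig (forward temp : Int) (cod p : String) : Bool :=
  let s := pvSumB (cod.toList.zip p.toList)
  decide (s < temp) && (decide (forward ≠ 1) || decide (s ≠ 0))

lemma pvRemoved_eq (seqs : List String) (f t : Int) (p : String) :
    pvRemoved seqs f t p = seqs.any (fun cod => pvTrig f t cod p) := rfl

-- A's inner-loop body equals erase-if-trigger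
lemma pvStepA_eq (f t : Int) (cod : String) (fl : List String) (i : String) :
    (let total_sum := pvSumA t (cod.toList.zip i.toList) 0
      if f = 1 then
        if total_sum < t ∧ total_sum ≠ 0 then (if i ∈ fl then fl.erase i else fl) else fl
      else
        if total_sum < t then (if i ∈ fl then fl.erase i else fl) else fl)
    = (if pvTrig f t cod i then fl.erase i else fl) := by
  have hmem : (if i ∈ fl then fl.erase i else fl) = fl.erase i := by
    split_ifs with h
    · rfl
    · exact (List.erase_of_not_mem h).symm
  by_cases hf : f = 1
  · subst hf
    show (if (1 : Int) = 1 then _ else _) = _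
    rw [if_pos rfl, hmem]
    have htrig : pvTrig 1 t cod i
        = decide (pvSumB (cod.toList.zip i.toList) < t ∧ pvSumB (cod.toList.zip i.toList) ≠ 0) := by
      simp [pvTrig, Bool.decide_and]
    rw [htrig]
    simp only [decide_eq_true_eq]
    exact if_congr (pvTrig_lt t _) rfl rfl
  · show (if f = 1 then _ else _) = _
    rw [if_neg hf, hmem]
    have htrig : pvTrig f t cod i = decide (pvSumB (cod.toList.zip i.toList) < t) := by
      simp [pvTrig, hf]
    rw [htrig]
    simp only [decide_eq_true_eq]
    exact if_congr (pvTrig_lt' t _) rfl rfl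

-- erasing an element the filter drops does not change the filter
lemma pvFilter_erase (q : String → Bool) (l : List String) (a : String) (ha : q a = false) :
    (l.erase a).filter q = l.filter q := by
  induction l with
  | nil => rfl
  | cons b t ih =>
    by_cases hb : b = a
    · subst hb
      simp [List.erase_cons_head, ha]
    · rw [List.erase_cons_tail (by simpa using hb)]
      simp only [List.filter_cons, ih]

-- inner loop over the (unchanged) primer list: with enough occurrences in Q to cover
-- every triggered copy in fl, the fold filters out exactly the triggered elements
lemma pvInner_fold (tr : String → Bool) (Q : List String) :
    ∀ fl : List String, (∀ v, tr v = true → fl.count v ≤ Q.count v) →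
      Q.foldl (fun fl i => if tr i then fl.erase i else fl) fl
        = fl.filter (fun v => !tr v) := by
  induction Q with
  | nil =>
    intro fl h
    simp only [List.foldl_nil]
    symm
    apply List.filter_eq_self.mpr
    intro a ha
    cases h' : tr a with
    | false => simp
    | true =>
      exfalso
      have hc := h a h'
      simp only [List.count_nil] at hc
      have hp := List.count_pos_iff.mpr ha
      omega
  | cons q Q' ih =>
    intro fl h
    simp only [List.foldl_cons]
    by_cases hq : tr q = true
    · rw [if_pos hq, ih (fl.erase q) ?_, pvFilter_erase _ _ _ (by simp [hq])]
      intro v hv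
      by_cases hvq : v = q
      · subst hvq
        have h1 := h v hv
        rw [List.count_cons_self] at h1
        have h2 : (fl.erase v).count v = fl.count v - 1 := List.count_erase_self
        omega
      · rw [List.count_erase_of_ne hvq]
        have h1 := h v hv
        rw [List.count_cons_of_ne (Ne.symm hvq)] at h1
        exact h1
    · rw [if_neg hq]
      apply ih
      intro v hv
      have h1 := h v hv
      by_cases hvq : v = q
      · subst hvq
        exact absurd hv hq
      · rw [List.count_cons_of_ne (Ne.symm hvq)] at h1
        exact h1

-- outer loop: folding over sequences keeps the state as a filter of the primer list
lemma pvOuter_fold (f t : Int) (P : List String) :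
    ∀ (cs : List String) (g : String → Bool),
      cs.foldl (fun filtered cod =>
          P.foldl (fun fl i => if pvTrig f t cod i then fl.erase i else fl) filtered)
        (P.filter g)
      = P.filter (fun v => g v && !(cs.any (fun cod => pvTrig f t cod v))) := by
  intro cs
  induction cs with
  | nil =>
    intro g
    simp only [List.foldl_nil, List.any_nil, Bool.not_false, Bool.and_true]
  | cons c cs' ih =>
    intro g
    simp only [List.foldl_cons]
    rw [pvInner_fold (fun i => pvTrig f t c i) P (P.filter g)
        (fun v _ => (List.filter_sublist).count_le v),
      List.filter_filter, ih]
    apply List.filter_congr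
    intro v _
    simp only [List.any_cons]
    cases g v <;> cases pvTrig f t c v <;> cases cs'.any (fun cod => pvTrig f t cod v) <;> rfl

-- ===== VERDICT (by name: the statement is the Claim_ definition above) =====
theorem Filter_hamming_codTemp_spec : Claim_equal_Filter_hamming_codTemp := by
  intro seqs P f t _
  show Filter_hamming_codTemp seqs P f t = Filter_hamming_codTemp_alt seqs P f t
  unfold Filter_hamming_codTemp Filter_hamming_codTemp_alt
  calc seqs.foldl (fun filtered cod =>
        P.foldl (fun fl i =>
          let total_sum := pvSumA t (cod.toList.zip i.toList) 0
          if f = 1 then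
            if total_sum < t ∧ total_sum ≠ 0 then (if i ∈ fl then fl.erase i else fl) else fl
          else
            if total_sum < t then (if i ∈ fl then fl.erase i else fl) else fl) filtered) P
      = seqs.foldl (fun filtered cod =>
          P.foldl (fun fl i => if pvTrig f t cod i then fl.erase i else fl) filtered) P := by
        congr 1
        funext filtered cod
        congr 1
        funext fl i
        exact pvStepA_eq f t cod fl i
    _ = P.filter (fun v => (fun _ => true) v && !(seqs.any (fun cod => pvTrig f t cod v))) := by
        rw [← pvOuter_fold f t P seqs (fun _ => true)]
        simp
    _ = P.filter (fun p => !pvRemoved seqs f t p) := by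
        apply List.filter_congr
        intro v _
        rw [pvRemoved_eq]
        simp
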